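-- pv_equiv track=rewrite | github.com/kalviumcommunity/Mannat_AI_Medical_Chatbot | demo_zero_shot.py | naive_local_answer
-- ===== SOURCE A (Python) =====
-- def naive_local_answer(context: str, question: str) -> str:
--     """A deterministic, dependency-free fallback that attempts to answer using context.
--
--     This is NOT a real LLM — it only demonstrates the zero-shot prompt formatting and
--     shows a safe fallback when no API key is available.
--     """
--     ctx = context.lower()
--     q = question.lower()
--     # simple heuristic: return any sentence in context containing a keyword from the question
--     for sent in context.split("."):
--         s = sent.strip()
--         if not s:
--             continue
--         for token in q.split():
--             if len(token) > 3 and token in s.lower():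
--                 return s.strip() + ". (extracted from context - fallback)"
--     return "I don't know based on the provided context. (fallback)"
-- ===== SOURCE B (Python) =====
-- def naive_local_answer(context: str, question: str) -> str:
--     """Loop interchange: for each long question keyword find the index of the
--     first sentence containing it, then answer with the sentence at the minimum
--     index (the first sentence matching any keyword)."""
--     sents = [s.strip() for s in context.split(".")]
--     lows = [s.lower() for s in sents]
--     best = None
--     for tok in question.lower().split():
--         if len(tok) <= 3:
--             continue
--         for i, low in enumerate(lows):
--             if low and tok in low:
--                 if best is None or i < best:
--                     best = i
--                 break
--     if best is None:
--         return "I don't know based on the provided context. (fallback)"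
--     return sents[best] + ". (extracted from context - fallback)"
-- ===== Notes on version B (the rewrite author's own statement) =====
-- stated objective: alternative
-- what changed: B interchanges the loops: it iterates the >3-char question keywords in the outer loop, computing for each keyword the index of the first sentence containing it (inner scan with break), and answers with the sentence at the minimum such index, instead of A's sentence-outer scan that re-splits the question and tests every token inside every sentence.
import Mathlib
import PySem

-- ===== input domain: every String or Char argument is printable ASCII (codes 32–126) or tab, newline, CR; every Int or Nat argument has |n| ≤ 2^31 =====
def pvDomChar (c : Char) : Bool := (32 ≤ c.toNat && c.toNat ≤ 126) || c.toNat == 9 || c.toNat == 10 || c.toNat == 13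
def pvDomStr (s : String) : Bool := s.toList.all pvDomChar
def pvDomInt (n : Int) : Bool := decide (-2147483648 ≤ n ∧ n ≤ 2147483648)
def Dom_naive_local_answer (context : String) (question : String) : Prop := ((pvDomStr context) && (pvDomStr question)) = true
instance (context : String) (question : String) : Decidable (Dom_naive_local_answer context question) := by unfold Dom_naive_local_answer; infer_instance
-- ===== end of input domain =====

-- B interchanges the loops: for each >3-char keyword it finds the index of the first
-- sentence containing it, and answers with the sentence at the minimum such index,
-- instead of A's sentence-outer scan testing every token per sentence (objective: alternative).

def nlaSuffix : List Char := ". (extracted from context - fallback)".toList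

def nlaFallback : List Char := "I don't know based on the provided context. (fallback)".toList

-- ===== PORT A =====
-- inner loop: "for token in q.split(): if len(token) > 3 and token in s.lower(): return …"
def nlaInnerA (tokens : List (List Char)) (slow : List Char) : Bool :=
  match tokens with
  | [] => false
  | t :: ts =>
      if decide (3 < PySem.Chars.len t) && PySem.Chars.isIn t slow then true
      else nlaInnerA ts slow

-- outer loop: "for sent in context.split('.'): …" (q.split() is recomputed per sentence, as in A)
def nlaOuterA (q : List Char) (sents : List (List Char)) : List Char :=
  match sents with
  | [] => nlaFallback
  | sent :: rest =>
      let s := PySem.Chars.strip sent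
      if s = [] then nlaOuterA q rest
      else if nlaInnerA (PySem.Chars.split₀ q) (PySem.Chars.lower s) then
        PySem.Chars.strip s ++ nlaSuffix
      else nlaOuterA q rest

def naive_local_answer (context : String) (question : String) : String :=
  let _ctx := PySem.Chars.lower context.toList   -- A computes ctx and never uses it
  let q := PySem.Chars.lower question.toList
  String.ofList (nlaOuterA q (PySem.Chars.splitOn context.toList ['.']))

-- ===== PORT B =====
-- "if best is None or i < best: best = i"
def nlbUpd (best : Option Nat) (i : Nat) : Option Nat :=
  match best with
  | none => some i
  | some b => if i < b then some i else some b

-- outer loop over tokens: skip short ones, find first sentence index containing the token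
-- (the inner "for i, low in enumerate(lows): … break" is the first-index scan findIdx?)
def nlbLoop (lows : List (List Char)) (tokens : List (List Char)) (best : Option Nat) : Option Nat :=
  match tokens with
  | [] => best
  | t :: ts =>
      if PySem.Chars.len t ≤ 3 then nlbLoop lows ts best
      else
        match lows.findIdx? (fun low => !low.isEmpty && PySem.Chars.isIn t low) with
        | none => nlbLoop lows ts best
        | some i => nlbLoop lows ts (nlbUpd best i)

def naive_local_answer_alt (context : String) (question : String) : String :=
  let sents := (PySem.Chars.splitOn context.toList ['.']).map PySem.Chars.strip
  let lows := sents.map PySem.Chars.lower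
  match nlbLoop lows (PySem.Chars.split₀ (PySem.Chars.lower question.toList)) none with
  | none => String.ofList nlaFallback
  | some i => String.ofList (sents.getD i [] ++ nlaSuffix)

-- ===== PRECONDITION & SPEC =====
def Spec_naive_local_answer (context : String) (question : String) (out : String) : Prop := out = naive_local_answer_alt context question
instance (context : String) (question : String) (out : String) : Decidable (Spec_naive_local_answer context question out) := by unfold Spec_naive_local_answer; infer_instance

-- ===== CLAIM (what is proved, stated in full; the proofs are below) =====
def Claim_equal_naive_local_answer : Prop := ∀ (context : String) (question : String), Dom_naive_local_answer context question → Spec_naive_local_answer context question (naive_local_answer context question)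

-- ===== LEMMAS AND PROOFS =====

-- min of two optional indices (none = no hit)
def nlbMin (a b : Option Nat) : Option Nat :=
  match a, b with
  | none, b => b
  | a, none => a
  | some i, some j => some (min i j)

theorem nlbMin_none_right (a : Option Nat) : nlbMin a none = a := by cases a <;> rfl

theorem nlbMin_assoc (a b c : Option Nat) : nlbMin (nlbMin a b) c = nlbMin a (nlbMin b c) := by
  cases a <;> cases b <;> cases c <;> simp [nlbMin, Nat.min_assoc]

theorem nlbUpd_eq_min (best : Option Nat) (i : Nat) : nlbUpd best i = nlbMin best (some i) := by
  cases best with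
  | none => rfl
  | some b =>
      simp only [nlbUpd, nlbMin]
      by_cases h : i < b
      · rw [if_pos h]; congr 1; omega
      · rw [if_neg h]; congr 1; omega

theorem nlbMin_map_succ (a b : Option Nat) :
    nlbMin (a.map (· + 1)) (b.map (· + 1)) = (nlbMin a b).map (· + 1) := by
  cases a <;> cases b <;> simp [nlbMin, Nat.succ_min_succ]

-- first index of (p or q) is the min of the first indices of p and of q
theorem findIdx?_or {α : Type} (p q : α → Bool) (l : List α) :
    List.findIdx? (fun x => p x || q x) l = nlbMin (List.findIdx? p l) (List.findIdx? q l) := by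
  induction l with
  | nil => rfl
  | cons x xs ih =>
      rw [List.findIdx?_cons, List.findIdx?_cons, List.findIdx?_cons, ih]
      cases hp : p x with
      | true =>
          cases hq : q x <;> cases hfq : List.findIdx? q xs <;>
            simp [nlbMin]
      | false =>
          cases hq : q x with
          | true => cases hfp : List.findIdx? p xs <;> simp [nlbMin]
          | false => simp [nlbMin_map_succ]

-- keywords = tokens of q longer than 3 chars (A filters inside its inner loop)
def nlaKw (q : List Char) : List (List Char) :=
  (PySem.Chars.split₀ q).filter (fun t => decide (3 < PySem.Chars.len t))

-- the sentence predicate of A, on stripped sentences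
def nlaPred (keywords : List (List Char)) (s : List Char) : Bool :=
  !s.isEmpty && keywords.any (fun k => PySem.Chars.isIn k (PySem.Chars.lower s))

-- B's token loop computes the first index where any long token matches
theorem nlbLoop_eq_findIdx (lows : List (List Char)) (tokens : List (List Char))
    (best : Option Nat) :
    nlbLoop lows tokens best
      = nlbMin best
          (List.findIdx?
            (fun low => !low.isEmpty &&
              (tokens.filter (fun t => decide (3 < PySem.Chars.len t))).any
                (fun k => PySem.Chars.isIn k low)) lows) := by
  induction tokens generalizing best with
  | nil =>
      have h : List.findIdx? (fun low : List Char => !low.isEmpty && false) lows = none := by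
        rw [List.findIdx?_eq_none_iff]; intro x _; simp
      simp only [nlbLoop, List.filter_nil, List.any_nil, h, nlbMin_none_right]
  | cons t ts ih =>
      by_cases hlen : PySem.Chars.len t ≤ 3
      · have hf : (decide (3 < PySem.Chars.len t)) = false := decide_eq_false (not_lt.mpr hlen)
        rw [nlbLoop, if_pos hlen, List.filter_cons, hf]
        simp only [Bool.false_eq_true, if_neg (by simp : ¬False)]
        exact ih best
      · have hf : (decide (3 < PySem.Chars.len t)) = true := decide_eq_true (not_le.mp hlen)
        have hpred :
            (fun low : List Char => !low.isEmpty &&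
              ((t :: ts).filter (fun t => decide (3 < PySem.Chars.len t))).any
                (fun k => PySem.Chars.isIn k low))
            = (fun low : List Char =>
                (!low.isEmpty && PySem.Chars.isIn t low) ||
                (!low.isEmpty &&
                  (ts.filter (fun t => decide (3 < PySem.Chars.len t))).any
                    (fun k => PySem.Chars.isIn k low))) := by
          funext low
          rw [List.filter_cons, hf]
          simp [Bool.and_or_distrib_left]
        rw [nlbLoop, if_neg hlen, hpred, findIdx?_or]
        cases hcase : List.findIdx? (fun low : List Char => !low.isEmpty && PySem.Chars.isIn t low) lows with
        | none =>
            show nlbLoop lows ts best = _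
            rw [ih best]; rfl
        | some i =>
            show nlbLoop lows ts (nlbUpd best i) = _
            rw [ih (nlbUpd best i), nlbUpd_eq_min, nlbMin_assoc]

-- find? as lookup at findIdx?
theorem find?_eq_getD_findIdx? {α : Type} (p : α → Bool) (l : List α) (d : α) :
    l.find? p = (match l.findIdx? p with
                 | some i => some (l.getD i d)
                 | none => none) := by
  induction l with
  | nil => rfl
  | cons x xs ih =>
      rw [List.find?_cons, List.findIdx?_cons]
      by_cases hp : p x = true
      · simp [hp]
      · rw [Bool.not_eq_true] at hp
        simp only [hp, Bool.false_eq_true, if_neg (by simp : ¬False), ih]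
        cases List.findIdx? p xs <;> simp

-- Python's str.strip is idempotent
theorem nla_strip_idem (s : List Char) :
    PySem.Chars.strip (PySem.Chars.strip s) = PySem.Chars.strip s := by
  unfold PySem.Chars.strip PySem.Chars.lstrip PySem.Chars.rstrip
  set p := PySem.Chars.isspace
  set t := List.dropWhile p s with ht
  have htt : List.dropWhile p t = t := List.dropWhile_idempotent p s
  set r := (List.dropWhile p t.reverse).reverse with hr
  have hpre : r <+: t := by
    rw [hr, ← List.reverse_suffix]
    simpa using List.dropWhile_suffix (l := t.reverse) p
  have h1 : List.dropWhile p r = r := by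
    obtain ⟨u, hu⟩ := hpre
    cases hre : r with
    | nil => rfl
    | cons a rs =>
        have hpa : p a = false := by
          rw [← hu, hre, List.cons_append, List.dropWhile_cons] at htt
          by_contra hpa
          rw [Bool.not_eq_false] at hpa
          rw [if_pos hpa] at htt
          have hle := List.length_dropWhile_le p (rs ++ u)
          have hlen := congrArg List.length htt
          simp only [List.length_cons] at hlen
          omega
        rw [List.dropWhile_cons, hpa]
        simp
  rw [h1, hr, List.reverse_reverse, List.dropWhile_idempotent]

theorem nla_inner_any (tokens : List (List Char)) (slow : List Char) :
    nlaInnerA tokens slow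
      = tokens.any (fun t => decide (3 < PySem.Chars.len t) && PySem.Chars.isIn t slow) := by
  induction tokens with
  | nil => rfl
  | cons t ts ih =>
      rw [nlaInnerA, List.any_cons, ih]
      by_cases h : (decide (3 < PySem.Chars.len t) && PySem.Chars.isIn t slow) = true
      · rw [if_pos h, h, Bool.true_or]
      · rw [if_neg h]
        rw [Bool.not_eq_true] at h
        rw [h, Bool.false_or]

theorem nla_inner_kw (q slow : List Char) :
    nlaInnerA (PySem.Chars.split₀ q) slow
      = (nlaKw q).any (fun k => PySem.Chars.isIn k slow) := by
  rw [nlaKw, List.any_filter, nla_inner_any]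

-- A's sentence loop is the first stripped sentence satisfying nlaPred
theorem nla_outer_find (q : List Char) (sents : List (List Char)) :
    nlaOuterA q sents
      = (match (sents.map PySem.Chars.strip).find? (nlaPred (nlaKw q)) with
         | some s => s ++ nlaSuffix
         | none => nlaFallback) := by
  induction sents with
  | nil => rfl
  | cons sent rest ih =>
      rw [nlaOuterA, List.map_cons, List.find?_cons]
      by_cases hs : PySem.Chars.strip sent = []
      · have hpred : nlaPred (nlaKw q) (PySem.Chars.strip sent) = false := by
          simp [nlaPred, hs]
        rw [if_pos hs, hpred]
        exact ih
      · rw [if_neg hs]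
        rw [nla_inner_kw]
        by_cases hm : (nlaKw q).any
            (fun k => PySem.Chars.isIn k (PySem.Chars.lower (PySem.Chars.strip sent))) = true
        · have hpred : nlaPred (nlaKw q) (PySem.Chars.strip sent) = true := by
            simp [nlaPred, hm, hs]
          rw [if_pos hm, hpred]
          show PySem.Chars.strip (PySem.Chars.strip sent) ++ nlaSuffix
              = PySem.Chars.strip sent ++ nlaSuffix
          rw [nla_strip_idem]
        · have hpred : nlaPred (nlaKw q) (PySem.Chars.strip sent) = false := by
            simp only [Bool.not_eq_true] at hm
            simp [nlaPred, hm]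
          rw [if_neg hm, hpred]
          exact ih

-- lowering a sentence does not change its emptiness
theorem nla_lower_isEmpty (s : List Char) : (PySem.Chars.lower s).isEmpty = s.isEmpty := by
  simp [PySem.Chars.lower]

-- B's keyword-wise predicate over the lowered sentences, read back on the stripped sentences
theorem nla_findIdx_lows (sents : List (List Char)) (kws : List (List Char)) :
    List.findIdx?
        (fun low => !low.isEmpty && kws.any (fun k => PySem.Chars.isIn k low))
        (sents.map PySem.Chars.lower)
      = List.findIdx? (nlaPred kws) sents := by
  rw [List.findIdx?_map]
  congr 1
  funext s
  simp only [Function.comp, nlaPred, nla_lower_isEmpty]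

-- ===== VERDICT (by name: the statement is the Claim_ definition above) =====
theorem naive_local_answer_spec : Claim_equal_naive_local_answer := by
  intro context question _
  show naive_local_answer context question = naive_local_answer_alt context question
  simp only [naive_local_answer, naive_local_answer_alt]
  rw [nla_outer_find]
  set q := PySem.Chars.lower question.toList with hq
  set sents := (PySem.Chars.splitOn context.toList ['.']).map PySem.Chars.strip with hsents
  rw [nlbLoop_eq_findIdx]
  have hmin : nlbMin none
      (List.findIdx?
        (fun low => !low.isEmpty &&
          ((PySem.Chars.split₀ q).filter (fun t => decide (3 < PySem.Chars.len t))).any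
            (fun k => PySem.Chars.isIn k low)) (sents.map PySem.Chars.lower))
      = List.findIdx? (nlaPred (nlaKw q)) sents := by
    show List.findIdx? _ _ = _
    rw [← nlaKw, nla_findIdx_lows]
  rw [hmin, find?_eq_getD_findIdx? (nlaPred (nlaKw q)) sents []]
  cases List.findIdx? (nlaPred (nlaKw q)) sents <;> rfl
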